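-- pv_equiv track=rewrite | github.com/fornellas/cdd_comm | cdd_comm/record.py | _raw_list_to_text_list
-- ===== SOURCE A (Python) =====
-- from typing import ClassVar, Dict, List, Optional, Set, Type
--
-- def _raw_list_to_text_list(raw_list: List[Optional[str]]) -> List[str]:
--     text_list: List[str] = []
--     data: bool = False
--     for e in reversed(raw_list):
--         if e is None:
--             if data:
--                 text_list.insert(0, "")
--             else:
--                 continue
--         else:
--             data = True
--             text_list.insert(0, e)
--     return text_list
-- ===== SOURCE B (Python) =====
-- from typing import List, Optional
--
-- def _raw_list_to_text_list(raw_list: List[Optional[str]]) -> List[str]: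
--     last = -1
--     for i, e in enumerate(raw_list):
--         if e is not None:
--             last = i
--     return ["" if e is None else e for e in raw_list[:last + 1]]
-- ===== Notes on version B (the rewrite author's own statement) =====
-- stated objective: faster
-- what changed: Two-stage forward pass: record the index of the last non-None element, then map one slice up to it (None -> ""), instead of iterating the reversed list with an O(n) insert(0) per kept element.
import Mathlib
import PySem

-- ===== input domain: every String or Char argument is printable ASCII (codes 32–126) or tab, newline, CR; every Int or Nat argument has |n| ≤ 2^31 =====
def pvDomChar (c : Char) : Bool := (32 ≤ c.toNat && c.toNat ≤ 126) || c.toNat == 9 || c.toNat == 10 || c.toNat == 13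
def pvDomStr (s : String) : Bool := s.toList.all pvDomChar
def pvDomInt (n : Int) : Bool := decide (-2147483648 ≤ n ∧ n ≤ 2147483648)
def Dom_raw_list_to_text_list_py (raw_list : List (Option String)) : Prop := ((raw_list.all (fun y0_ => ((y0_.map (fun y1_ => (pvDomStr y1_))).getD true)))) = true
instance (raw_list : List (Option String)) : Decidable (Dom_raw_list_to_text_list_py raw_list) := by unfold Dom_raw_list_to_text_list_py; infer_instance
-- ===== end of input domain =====

-- B replaces A's reversed iteration with O(n)-per-element insert(0) by two O(n)
-- stages: find the last non-None index, then map one slice (faster, O(n^2) → O(n)).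

-- ===== PORT A =====
-- for e in reversed(raw_list): state (text_list, data); insert(0, x) = cons
def raw_list_to_text_list_py (raw_list : List (Option String)) : List String :=
  (raw_list.reverse.foldl
    (fun (st : List String × Bool) e =>
      match e with
      | none => if st.2 then ("" :: st.1, st.2) else st
      | some s => (s :: st.1, true))
    ([], false)).1

-- ===== PORT B =====
-- last = -1; for i, e in enumerate(raw_list): if e is not None: last = i
-- then the comprehension over raw_list[:last+1]
def raw_list_to_text_list_py_alt (raw_list : List (Option String)) : List String :=
  let last : Int :=
    (PySem.List.enumerate raw_list).foldl
      (fun acc p => if p.2.isSome then p.1 else acc) (-1)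
  (PySem.List.slice raw_list none (some (last + 1))).map
    (fun e => match e with | none => "" | some s => s)

-- ===== PRECONDITION & SPEC =====
def Spec_raw_list_to_text_list_py (raw_list : List (Option String)) (out : List String) : Prop := out = raw_list_to_text_list_py_alt raw_list
instance (raw_list : List (Option String)) (out : List String) : Decidable (Spec_raw_list_to_text_list_py raw_list out) := by unfold Spec_raw_list_to_text_list_py; infer_instance

-- ===== CLAIM (what is proved, stated in full; the proofs are below) =====
def Claim_equal_raw_list_to_text_list_py : Prop := ∀ (raw_list : List (Option String)), Dom_raw_list_to_text_list_py raw_list → Spec_raw_list_to_text_list_py raw_list (raw_list_to_text_list_py raw_list)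

-- ===== LEMMAS AND PROOFS =====

-- Reference recursion: trailing Nones dropped, interior Nones become "".
def pvSpecF : List (Option String) → List String
  | [] => []
  | some s :: t => s :: pvSpecF t
  | none :: t => if t.any Option.isSome then "" :: pvSpecF t else []

-- Length of the list after dropping trailing Nones.
def pvTrimLen : List (Option String) → Nat
  | [] => 0
  | x :: t => if t.any Option.isSome then pvTrimLen t + 1 else (if x.isSome then 1 else 0)

theorem pvSpecF_nil_of_not_any (l : List (Option String))
    (h : l.any Option.isSome = false) : pvSpecF l = [] := by
  induction l with
  | nil => rfl
  | cons x t ih =>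
    cases x with
    | none =>
      simp only [List.any_cons, Option.isSome_none, Bool.false_or] at h
      simp [pvSpecF, h]
    | some s => simp [List.any_cons, Option.isSome] at h

theorem pvTrimLen_zero_of_not_any (l : List (Option String))
    (h : l.any Option.isSome = false) : pvTrimLen l = 0 := by
  induction l with
  | nil => rfl
  | cons x t ih =>
    simp only [List.any_cons, Bool.or_eq_false_iff] at h
    simp [pvTrimLen, h.2, h.1]

theorem pvA_fold (l : List (Option String)) :
    (l.reverse.foldl
      (fun (st : List String × Bool) e =>
        match e with
        | none => if st.2 then ("" :: st.1, st.2) else st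
        | some s => (s :: st.1, true))
      ([], false)) = (pvSpecF l, l.any Option.isSome) := by
  induction l with
  | nil => rfl
  | cons x t ih =>
    simp only [List.reverse_cons, List.foldl_append, ih, List.foldl_cons, List.foldl_nil]
    cases x with
    | none =>
      cases h : t.any Option.isSome with
      | true => simp [pvSpecF, h]
      | false => simp [pvSpecF, h, pvSpecF_nil_of_not_any t h]
    | some s => simp [pvSpecF, List.any_cons]

theorem pvA_eq_specF (l : List (Option String)) :
    raw_list_to_text_list_py l = pvSpecF l := by
  unfold raw_list_to_text_list_py
  rw [pvA_fold]

-- pvSpecF is "take the trimmed prefix and default the Nones".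
theorem pvSpecF_eq_take_map (l : List (Option String)) :
    pvSpecF l = (l.take (pvTrimLen l)).map
      (fun e => match e with | none => "" | some s => s) := by
  induction l with
  | nil => rfl
  | cons x t ih =>
    cases h : t.any Option.isSome with
    | true =>
      cases x with
      | none => simp [pvSpecF, pvTrimLen, h, ih]
      | some s => simp [pvSpecF, pvTrimLen, h, ih]
    | false =>
      cases x with
      | none => simp [pvSpecF, pvTrimLen, h]
      | some s =>
        simp [pvSpecF, pvTrimLen, h, pvSpecF_nil_of_not_any t h]

-- B's index-tracking fold, characterised for an arbitrary start offset.
theorem pvB_fold (l : List (Option String)) (off : Int) (acc : Int) :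
    ((PySem.List.enumerate l off).foldl
      (fun acc p => if p.2.isSome then p.1 else acc) acc) =
    if l.any Option.isSome then off + (pvTrimLen l : Int) - 1 else acc := by
  induction l generalizing off acc with
  | nil => rfl
  | cons x t ih =>
    rw [PySem.List.enumerate_cons, List.foldl_cons]
    cases x with
    | none =>
      simp only [Option.isSome_none, Bool.false_eq_true, if_false, ih]
      cases h : t.any Option.isSome with
      | true => simp [pvTrimLen, h]; ring
      | false => simp [List.any_cons, h]
    | some s =>
      simp only [Option.isSome_some, if_true, ih]
      cases h : t.any Option.isSome with
      | true => simp [pvTrimLen, h, List.any_cons]; ring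
      | false =>
        simp [pvTrimLen, h, List.any_cons]

theorem pvB_eq_specF (l : List (Option String)) :
    raw_list_to_text_list_py_alt l = pvSpecF l := by
  unfold raw_list_to_text_list_py_alt
  rw [pvB_fold, pvSpecF_eq_take_map]
  cases h : l.any Option.isSome with
  | true =>
    have h1 : (0:Int) ≤ 0 + (pvTrimLen l : Int) - 1 + 1 := by omega
    rw [if_pos rfl]
    show (PySem.List.slice l none (some (0 + (pvTrimLen l : Int) - 1 + 1))).map
      (fun e => match e with | none => "" | some s => s) = _
    rw [PySem.List.slice_to _ h1]
    congr 2
    omega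
  | false =>
    rw [if_neg (by simp), pvTrimLen_zero_of_not_any l h]
    show (PySem.List.slice l none (some (-1 + 1))).map
      (fun e => match e with | none => "" | some s => s) = _
    norm_num
    rw [PySem.List.slice_to _ (by omega : (0:Int) ≤ 0)]
    simp

-- ===== VERDICT (by name: the statement is the Claim_ definition above) =====
theorem raw_list_to_text_list_py_spec : Claim_equal_raw_list_to_text_list_py := by
  intro l _
  unfold Spec_raw_list_to_text_list_py
  rw [pvA_eq_specF, pvB_eq_specF]
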